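-- pv_equiv track=rewrite | github.com/darius024/persona2hire | persona2hire/ml/feature_extractor.py | _get_seniority
-- ===== SOURCE A (Python) =====
-- def _get_seniority(occupation: str) -> int:
--     """Get seniority level from occupation (0-6)."""
--     occ_lower = occupation.lower()
--
--     levels = {
--         6: ["ceo", "cto", "cfo", "director", "vp", "president"],
--         5: ["head", "chief", "principal", "partner"],
--         4: ["senior manager", "senior director"],
--         3: ["manager", "lead", "supervisor"],
--         2: ["senior", "specialist", "analyst"],
--         1: ["junior", "associate", "assistant", "intern"],
--     }
--
--     for level, keywords in levels.items():
--         if any(kw in occ_lower for kw in keywords):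
--             return level
--     return 0
-- ===== SOURCE B (Python) =====
-- # Flat (keyword, level) table scanned once, keeping the maximum matched level
-- # (equivalent to A's descending-priority first-match loop).
-- _PAIRS = [
--     ("ceo", 6), ("cto", 6), ("cfo", 6), ("director", 6), ("vp", 6), ("president", 6),
--     ("head", 5), ("chief", 5), ("principal", 5), ("partner", 5),
--     ("senior manager", 4), ("senior director", 4),
--     ("manager", 3), ("lead", 3), ("supervisor", 3),
--     ("senior", 2), ("specialist", 2), ("analyst", 2),
--     ("junior", 1), ("associate", 1), ("assistant", 1), ("intern", 1),
-- ]
--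
-- def _get_seniority(occupation: str) -> int:
--     occ = occupation.lower()
--     best = 0
--     for kw, level in _PAIRS:
--         if kw in occ and level > best:
--             best = level
--     return best
-- ===== Notes on version B (the rewrite author's own statement) =====
-- stated objective: alternative
-- what changed: Replaced the priority-ordered dict loop with an early return by a single scan over a flat (keyword, level) list that keeps the maximum matched level.
import Mathlib
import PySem

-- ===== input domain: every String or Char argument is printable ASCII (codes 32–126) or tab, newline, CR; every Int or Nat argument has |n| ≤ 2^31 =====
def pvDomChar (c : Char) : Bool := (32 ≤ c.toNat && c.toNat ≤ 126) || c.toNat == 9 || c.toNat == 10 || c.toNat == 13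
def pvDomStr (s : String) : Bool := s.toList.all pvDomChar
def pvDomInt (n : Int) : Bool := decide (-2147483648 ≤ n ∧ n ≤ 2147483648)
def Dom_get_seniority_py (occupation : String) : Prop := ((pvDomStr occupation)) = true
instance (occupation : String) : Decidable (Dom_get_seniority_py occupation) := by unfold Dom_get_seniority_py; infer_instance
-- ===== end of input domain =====

-- B replaces A's priority-ordered first-match dict loop with one max-keeping scan over a flat (keyword, level) list (alternative decomposition, same cost).

-- ===== PORT A =====
def get_seniority_py (occupation : String) : Int :=
  let occ_lower := PySem.Str.lower occupation
  -- the levels dict, as an association list in insertion order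
  let levels : List (Int × List String) :=
    [(6, ["ceo", "cto", "cfo", "director", "vp", "president"]),
     (5, ["head", "chief", "principal", "partner"]),
     (4, ["senior manager", "senior director"]),
     (3, ["manager", "lead", "supervisor"]),
     (2, ["senior", "specialist", "analyst"]),
     (1, ["junior", "associate", "assistant", "intern"])]
  -- 'for level, keywords: if any(...): return level' as a first-hit fold; 'return 0' as the getD default
  (levels.foldl
      (fun (acc : Option Int) (p : Int × List String) =>
        if acc.isSome then acc
        else if p.2.any (fun kw => PySem.Str.isIn kw occ_lower) then some p.1 else none)
      none).getD 0

-- ===== PORT B =====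
def pvPairs : List (String × Int) :=
  [("ceo", 6), ("cto", 6), ("cfo", 6), ("director", 6), ("vp", 6), ("president", 6),
   ("head", 5), ("chief", 5), ("principal", 5), ("partner", 5),
   ("senior manager", 4), ("senior director", 4),
   ("manager", 3), ("lead", 3), ("supervisor", 3),
   ("senior", 2), ("specialist", 2), ("analyst", 2),
   ("junior", 1), ("associate", 1), ("assistant", 1), ("intern", 1)]

def get_seniority_py_alt (occupation : String) : Int :=
  let occ := PySem.Str.lower occupation
  pvPairs.foldl
    (fun (best : Int) (p : String × Int) =>
      if PySem.Str.isIn p.1 occ && decide (p.2 > best) then p.2 else best) 0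

-- ===== PRECONDITION & SPEC =====
def Spec_get_seniority_py (occupation : String) (out : Int) : Prop := out = get_seniority_py_alt occupation
instance (occupation : String) (out : Int) : Decidable (Spec_get_seniority_py occupation out) := by unfold Spec_get_seniority_py; infer_instance

-- ===== CLAIM (what is proved, stated in full; the proofs are below) =====
def Claim_equal_get_seniority_py : Prop := ∀ (occupation : String), Dom_get_seniority_py occupation → Spec_get_seniority_py occupation (get_seniority_py occupation)

-- ===== LEMMAS AND PROOFS =====

-- B's step is 'keep the running maximum of matched levels'
theorem pv_step (q : String → Bool) (kw : String) (l best : Int) :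
    (if q kw && decide (l > best) then l else best) = if q kw then max best l else best := by
  cases hq : q kw
  · simp
  · simp only [Bool.true_and, if_true]
    by_cases h : l > best
    · simp only [decide_eq_true h, if_true]; omega
    · simp only [decide_eq_false h, Bool.false_eq_true, if_false]; omega

-- a constant-level group of pairs folds to 'max b l' iff some keyword matches
theorem pv_foldl_group (q : String → Bool) (l : Int) (kws : List String) (b : Int) :
    List.foldl
      (fun (best : Int) (p : String × Int) =>
        if q p.1 && decide (p.2 > best) then p.2 else best)
      b (kws.map (fun kw => (kw, l)))
    = if kws.any q then max b l else b := by
  induction kws generalizing b with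
  | nil => simp
  | cons k t ih =>
    simp only [List.map_cons, List.foldl_cons, List.any_cons]
    rw [pv_step, ih]
    by_cases hk : q k = true
    · by_cases ht : t.any q = true
      · simp only [hk, ht, if_true, Bool.true_or, max_assoc, max_self]
      · simp only [Bool.not_eq_true] at ht
        simp only [hk, ht, if_true, Bool.true_or, Bool.false_eq_true, if_false]
    · simp only [Bool.not_eq_true] at hk
      simp only [hk, Bool.false_eq_true, if_false, Bool.false_or]

set_option maxHeartbeats 1000000 in
theorem pv_key (occ : String) : get_seniority_py occ = get_seniority_py_alt occ := by
  have hsplit : pvPairs =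
      (["ceo", "cto", "cfo", "director", "vp", "president"].map (fun kw => (kw, (6:Int)))) ++
      (["head", "chief", "principal", "partner"].map (fun kw => (kw, (5:Int)))) ++
      (["senior manager", "senior director"].map (fun kw => (kw, (4:Int)))) ++
      (["manager", "lead", "supervisor"].map (fun kw => (kw, (3:Int)))) ++
      (["senior", "specialist", "analyst"].map (fun kw => (kw, (2:Int)))) ++
      (["junior", "associate", "assistant", "intern"].map (fun kw => (kw, (1:Int)))) := rfl
  simp only [get_seniority_py, get_seniority_py_alt]
  rw [hsplit]
  rw [List.foldl_append, List.foldl_append, List.foldl_append, List.foldl_append,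
    List.foldl_append]
  simp only [pv_foldl_group (fun kw => PySem.Str.isIn kw (PySem.Str.lower occ))]
  simp only [List.foldl_cons, List.foldl_nil]
  by_cases h6 : (["ceo", "cto", "cfo", "director", "vp", "president"].any (fun kw => PySem.Str.isIn kw (PySem.Str.lower occ))) = true <;>
  by_cases h5 : (["head", "chief", "principal", "partner"].any (fun kw => PySem.Str.isIn kw (PySem.Str.lower occ))) = true <;>
  by_cases h4 : (["senior manager", "senior director"].any (fun kw => PySem.Str.isIn kw (PySem.Str.lower occ))) = true <;>
  by_cases h3 : (["manager", "lead", "supervisor"].any (fun kw => PySem.Str.isIn kw (PySem.Str.lower occ))) = true <;>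
  by_cases h2 : (["senior", "specialist", "analyst"].any (fun kw => PySem.Str.isIn kw (PySem.Str.lower occ))) = true <;>
  by_cases h1 : (["junior", "associate", "assistant", "intern"].any (fun kw => PySem.Str.isIn kw (PySem.Str.lower occ))) = true <;>
  simp only [h6, h5, h4, h3, h2, h1, Bool.false_eq_true, if_true, if_false,
    Option.isSome_some, Option.isSome_none, Option.getD_some, Option.getD_none] <;> rfl

-- ===== VERDICT (by name: the statement is the Claim_ definition above) =====
theorem get_seniority_py_spec : Claim_equal_get_seniority_py := by
  intro occ _
  unfold Spec_get_seniority_py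
  exact pv_key occ
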